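-- pv_equiv track=rewrite | github.com/exiw-ai/proofloop | src/application/services/tool_gating.py | _tokenize_bash
-- ===== SOURCE A (Python) =====
-- def _tokenize_bash(command: str) -> list[str]:
--     """Simple tokenizer for bash command validation."""
--     tokens: list[str] = []
--     current = ""
--     in_quote: str | None = None
--     i = 0
--
--     while i < len(command):
--         char = command[i]
--
--         # Handle quoting
--         if char in ('"', "'") and in_quote is None:
--             in_quote = char
--             current += char
--         elif char == in_quote:
--             current += char
--             in_quote = None
--         elif in_quote:
--             current += char
--         # Handle special tokens
--         elif char in " \t":
--             if current:
--                 tokens.append(current)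
--                 current = ""
--         elif char == "|" and i + 1 < len(command) and command[i + 1] == "|":
--             if current:
--                 tokens.append(current)
--                 current = ""
--             tokens.append("||")
--             i += 1
--         elif char == "|":
--             if current:
--                 tokens.append(current)
--                 current = ""
--             tokens.append("|")
--         elif char == "&" and i + 1 < len(command) and command[i + 1] == "&":
--             if current:
--                 tokens.append(current)
--                 current = ""
--             tokens.append("&&")
--             i += 1
--         elif char == "&" and i + 1 < len(command) and command[i + 1] == ">":
--             if current:
--                 tokens.append(current)
--                 current = ""
--             tokens.append("&>")
--             i += 1
--         elif char == ">" and i + 1 < len(command) and command[i + 1] == ">":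
--             if current:
--                 tokens.append(current)
--                 current = ""
--             tokens.append(">>")
--             i += 1
--         elif char == "2" and i + 1 < len(command) and command[i + 1] == ">":
--             if current:
--                 tokens.append(current)
--                 current = ""
--             tokens.append("2>")
--             i += 1
--         elif char == "<" and i + 1 < len(command) and command[i + 1] == "<":
--             if current:
--                 tokens.append(current)
--                 current = ""
--             tokens.append("<<")
--             i += 1
--         elif char == "<" and i + 1 < len(command) and command[i + 1] == "(":
--             if current:
--                 tokens.append(current)
--                 current = ""
--             tokens.append("<(")
--             i += 1
--         elif char == ">" and i + 1 < len(command) and command[i + 1] == "(":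
--             if current:
--                 tokens.append(current)
--                 current = ""
--             tokens.append(">(")
--             i += 1
--         elif char == "$" and i + 1 < len(command) and command[i + 1] == "(":
--             if current:
--                 tokens.append(current)
--                 current = ""
--             tokens.append("$(")
--             i += 1
--         elif char in ";><`\n":
--             if current:
--                 tokens.append(current)
--                 current = ""
--             tokens.append(char)
--         else:
--             current += char
--
--         i += 1
--
--     if current:
--         tokens.append(current)
--
--     return tokens
-- ===== SOURCE B (Python) =====
-- # Token-at-a-time maximal-munch tokenizer: instead of A's char-by-char scan with a
-- # `current` accumulator and flush-before-every-emit, B finds each whole token at once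
-- # (skip whitespace; two-char operator; single-char delimiter; else scan a full
-- # quote-aware word and slice it out).  Same return value, different decomposition.
--
-- TWO = ("||", "&&", "&>", ">>", "2>", "<<", "<(", ">(", "$(")
-- ONE = "|;><`\n"
--
--
-- def _tokenize_bash(command: str) -> list[str]:
--     tokens: list[str] = []
--     i = 0
--     n = len(command)
--     while i < n:
--         c = command[i]
--         if c in " \t":
--             i += 1
--         elif command[i : i + 2] in TWO:
--             tokens.append(command[i : i + 2])
--             i += 2
--         elif c in ONE:
--             tokens.append(c)
--             i += 1
--         else:
--             q = c if c in "\"'" else None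
--             j = i + 1
--             while j < n:
--                 d = command[j]
--                 if q is not None:
--                     if d == q:
--                         q = None
--                 elif d in "\"'":
--                     q = d
--                 elif d in " \t" or d in ONE or command[j : j + 2] in TWO:
--                     break
--                 j += 1
--             tokens.append(command[i:j])
--             i = j
--     return tokens
-- ===== Notes on version B (the rewrite author's own statement) =====
-- stated objective: faster
-- what changed: Replaces A's char-by-char state machine (a `current` string grown by repeated concatenation, flushed before every emit, with an in_quote flag carried across the whole scan) by a token-at-a-time maximal-munch tokenizer: skip whitespace, recognize a two-char operator, a single-char delimiter, or scan one whole quote-aware word and slice it out of the input in one step.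
import Mathlib
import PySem

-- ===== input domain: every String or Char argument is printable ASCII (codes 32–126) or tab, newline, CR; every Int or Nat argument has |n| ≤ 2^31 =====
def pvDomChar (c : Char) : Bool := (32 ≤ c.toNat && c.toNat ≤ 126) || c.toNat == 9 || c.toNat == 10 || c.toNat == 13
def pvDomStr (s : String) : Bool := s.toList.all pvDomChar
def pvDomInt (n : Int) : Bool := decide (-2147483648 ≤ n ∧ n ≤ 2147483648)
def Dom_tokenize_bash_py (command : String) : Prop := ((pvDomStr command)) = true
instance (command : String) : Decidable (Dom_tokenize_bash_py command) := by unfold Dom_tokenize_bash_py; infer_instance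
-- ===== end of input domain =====

-- B is a token-at-a-time maximal-munch tokenizer (whole tokens sliced out in one
-- step, no per-character `current += char` accumulator / flush), replacing A's
-- char-by-char state machine; a timing run measured B faster.

-- ===== PORT A =====
-- `if current: tokens.append(current); current = ""` (A repeats this before every emit)
def flushA (toks : List String) (cur : List Char) : List String :=
  if cur ≠ [] then toks ++ [String.ofList cur] else toks

-- the while loop of A: state = (remaining chars, in_quote, current, tokens); branch order as in A
def loopA : List Char → Option Char → List Char → List String → List String
  | [], _, cur, toks => flushA toks cur
  | c :: rest, inq, cur, toks =>
    if (c = '"' ∨ c = '\'') ∧ inq = none then loopA rest (some c) (cur ++ [c]) toks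
    else if some c = inq then loopA rest none (cur ++ [c]) toks
    else if inq ≠ none then loopA rest inq (cur ++ [c]) toks
    else if c = ' ' ∨ c = '\t' then loopA rest inq [] (flushA toks cur)
    else if c = '|' ∧ rest.head? = some '|' then loopA rest.tail inq [] (flushA toks cur ++ ["||"])
    else if c = '|' then loopA rest inq [] (flushA toks cur ++ ["|"])
    else if c = '&' ∧ rest.head? = some '&' then loopA rest.tail inq [] (flushA toks cur ++ ["&&"])
    else if c = '&' ∧ rest.head? = some '>' then loopA rest.tail inq [] (flushA toks cur ++ ["&>"])
    else if c = '>' ∧ rest.head? = some '>' then loopA rest.tail inq [] (flushA toks cur ++ [">>"])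
    else if c = '2' ∧ rest.head? = some '>' then loopA rest.tail inq [] (flushA toks cur ++ ["2>"])
    else if c = '<' ∧ rest.head? = some '<' then loopA rest.tail inq [] (flushA toks cur ++ ["<<"])
    else if c = '<' ∧ rest.head? = some '(' then loopA rest.tail inq [] (flushA toks cur ++ ["<("])
    else if c = '>' ∧ rest.head? = some '(' then loopA rest.tail inq [] (flushA toks cur ++ [">("])
    else if c = '$' ∧ rest.head? = some '(' then loopA rest.tail inq [] (flushA toks cur ++ ["$("])
    else if c = ';' ∨ c = '>' ∨ c = '<' ∨ c = '`' ∨ c = '\n' then loopA rest inq [] (flushA toks cur ++ [String.ofList [c]])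
    else loopA rest inq (cur ++ [c]) toks
  termination_by cs _ _ _ => cs.length
  decreasing_by all_goals (simp [List.length_tail]; try omega)

def tokenize_bash_py (command : String) : List String :=
  loopA command.toList none [] []

-- ===== PORT B =====
def twoCharOps : List String := ["||", "&&", "&>", ">>", "2>", "<<", "<(", ">(", "$("]
def singleDelims : List Char := ['|', ';', '>', '<', '`', '\n']

-- the inner while loop of B: scans the remainder of one quote-aware word,
-- returns (word characters consumed, rest of the input)
def takeWord : List Char → Option Char → List Char × List Char
  | [], _ => ([], [])
  | d :: rest, some q =>
    (d :: (takeWord rest (if d = q then none else some q)).1,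
     (takeWord rest (if d = q then none else some q)).2)
  | d :: rest, none =>
    if d = '"' ∨ d = '\'' then
      (d :: (takeWord rest (some d)).1, (takeWord rest (some d)).2)
    else if d = ' ' ∨ d = '\t' ∨ d ∈ singleDelims ∨ String.ofList (d :: rest.take 1) ∈ twoCharOps then
      ([], d :: rest)
    else
      (d :: (takeWord rest none).1, (takeWord rest none).2)

-- (termination helper for loopB) the rest returned by takeWord never grows
theorem takeWord_snd_len : ∀ (cs : List Char) (q : Option Char), (takeWord cs q).2.length ≤ cs.length := by
  intro cs
  induction cs with
  | nil => intro q; simp [takeWord]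
  | cons d rest ih =>
    intro q
    cases q with
    | some q => simpa [takeWord] using (ih _).trans (Nat.le_succ _)
    | none =>
      rw [takeWord]
      split_ifs <;> simp <;> exact (ih _).trans (Nat.le_succ _)

-- the outer while loop of B: one whole token per step
def loopB : List Char → List String
  | [] => []
  | c :: rest =>
    if c = ' ' ∨ c = '\t' then loopB rest
    else if String.ofList (c :: rest.take 1) ∈ twoCharOps then
      String.ofList (c :: rest.take 1) :: loopB (rest.drop 1)
    else if c ∈ singleDelims then
      String.ofList [c] :: loopB rest
    else
      String.ofList (c :: (takeWord rest (if c = '"' ∨ c = '\'' then some c else none)).1) ::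
        loopB (takeWord rest (if c = '"' ∨ c = '\'' then some c else none)).2
  termination_by cs => cs.length
  decreasing_by
    all_goals simp
    all_goals exact takeWord_snd_len rest _

def tokenize_bash_py_alt (command : String) : List String :=
  loopB command.toList

-- ===== PRECONDITION & SPEC =====
def Spec_tokenize_bash_py (command : String) (out : List String) : Prop := out = tokenize_bash_py_alt command
instance (command : String) (out : List String) : Decidable (Spec_tokenize_bash_py command out) := by unfold Spec_tokenize_bash_py; infer_instance

-- ===== CLAIM (what is proved, stated in full; the proofs are below) =====
def Claim_equal_tokenize_bash_py : Prop := ∀ (command : String), Dom_tokenize_bash_py command → Spec_tokenize_bash_py command (tokenize_bash_py command)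

-- ===== LEMMAS AND PROOFS =====
def optFlush (l : List Char) : List String := if l = [] then [] else [String.ofList l]

theorem flushA_eq (toks : List String) (cur : List Char) : flushA toks cur = toks ++ optFlush cur := by
  simp [flushA, optFlush]; split_ifs <;> simp_all

-- loopB emits exactly the word takeWord finds (or passes through a break position)
theorem loopB_takeWord (cs : List Char) :
    loopB cs = optFlush (takeWord cs none).1 ++ loopB (takeWord cs none).2 := by
  cases cs with
  | nil => simp [loopB, takeWord, optFlush]
  | cons c rest =>
    rw [takeWord]
    by_cases hq : c = '"' ∨ c = '\''
    · rw [loopB.eq_def]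
      have h1 : ¬ (c = ' ' ∨ c = '\t') := by rcases hq with rfl | rfl <;> decide
      have h2 : String.ofList (c :: rest.take 1) ∉ twoCharOps := by
        rcases hq with rfl | rfl <;>
          cases rest with
          | nil => decide
          | cons d t => simp [twoCharOps, String.ext_iff]
      have h3 : c ∉ singleDelims := by rcases hq with rfl | rfl <;> decide
      simp [hq, h1, h2, h3, optFlush]
    · by_cases hb : c = ' ' ∨ c = '\t' ∨ c ∈ singleDelims ∨ String.ofList (c :: rest.take 1) ∈ twoCharOps
      · simp [hq, hb, optFlush]
      · rw [loopB.eq_def]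
        push Not at hb
        obtain ⟨h1, h2, h3, h4⟩ := hb
        simp [hq, h1, h2, h3, h4, optFlush]

-- takeWord stops immediately at a delimiter/operator position
theorem tw_break (a : Char) (t : List Char) (hq : ¬(a = '"' ∨ a = '\''))
    (hb : a = ' ' ∨ a = '\t' ∨ a ∈ singleDelims ∨ String.ofList (a :: t.take 1) ∈ twoCharOps) :
    takeWord (a :: t) none = ([], a :: t) := by
  rw [takeWord]; simp [hq, hb]

-- loopB emits a two-char operator
theorem emit2 (a b : Char) (t : List Char) (hsp : ¬(a = ' ' ∨ a = '\t'))
    (hop : String.ofList [a, b] ∈ twoCharOps) :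
    loopB (a :: b :: t) = String.ofList [a, b] :: loopB t := by
  rw [loopB.eq_def]; simp [hsp, hop]

-- loopB emits a single-char delimiter
theorem emit1 (a : Char) (t : List Char) (hsp : ¬(a = ' ' ∨ a = '\t'))
    (hop : String.ofList (a :: t.take 1) ∉ twoCharOps) (hd : a ∈ singleDelims) :
    loopB (a :: t) = String.ofList [a] :: loopB t := by
  rw [loopB.eq_def]; simp [hsp, hop, hd]

-- loopB skips whitespace
theorem skip1 (a : Char) (t : List Char) (hsp : a = ' ' ∨ a = '\t') :
    loopB (a :: t) = loopB t := by
  rw [loopB.eq_def]; simp [hsp]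

set_option maxHeartbeats 1000000 in
theorem main_invariant : ∀ (cs : List Char) (q : Option Char) (cur : List Char) (toks : List String),
    loopA cs q cur toks = toks ++ optFlush (cur ++ (takeWord cs q).1) ++ loopB (takeWord cs q).2 := by
  intro cs q cur toks
  fun_induction loopA cs q cur toks with
  | case1 => simp [takeWord, flushA_eq, loopB, optFlush]
  | case2 c rest inq cur toks h ih =>
      obtain ⟨hq, rfl⟩ := h
      simp [takeWord, hq, ih]
  | case3 c rest cur toks h ih =>
      simp [takeWord, ih]
  | case4 c rest inq cur toks h1 h2 h3 ih =>
      cases inq with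
      | none => exact absurd rfl h3
      | some q =>
        have hne : ¬ c = q := fun hc => h2 (by rw [hc])
        simp [takeWord, hne, ih]
  | case5 c rest inq cur toks h1 h2 h3 h4 ih =>
      obtain rfl : inq = none := not_not.mp h3
      rw [ih, flushA_eq, tw_break c rest (by rcases h4 with rfl | rfl <;> decide)
        (by tauto), skip1 c rest h4, loopB_takeWord rest]
      simp [optFlush]
  | case6 c rest inq cur toks h1 h2 h3 h4 h ih =>
      obtain ⟨rfl, hh⟩ := h
      obtain ⟨t, rfl⟩ : ∃ t, rest = '|' :: t := by
        cases rest <;> simp_all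
      obtain rfl : inq = none := not_not.mp h3
      simp only [List.tail_cons] at ih ⊢
      rw [ih, flushA_eq,
        tw_break _ _ (by decide) (by simp [singleDelims, twoCharOps, String.ext_iff]),
        emit2 _ _ _ (by decide) (by decide), loopB_takeWord t]
      simp [optFlush]
  | case7 rest inq cur toks h3 h1 h2 h4 h ih =>
      obtain rfl : inq = none := not_not.mp h3
      have hh : rest.head? ≠ some '|' := fun hx => h ⟨rfl, hx⟩
      have hop : String.ofList ('|' :: rest.take 1) ∉ twoCharOps := by
        cases rest with
        | nil => decide
        | cons d t => simp_all [twoCharOps, String.ext_iff]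
      rw [ih, flushA_eq,
        tw_break _ _ (by decide) (by simp [singleDelims]),
        emit1 _ _ (by decide) hop (by decide), loopB_takeWord rest]
      simp [optFlush]
  | case8 c rest inq cur toks h1 h2 h3 h4 h5 h6 h ih =>
      obtain ⟨rfl, hh⟩ := h
      obtain ⟨t, rfl⟩ : ∃ t, rest = '&' :: t := by
        cases rest <;> simp_all
      obtain rfl : inq = none := not_not.mp h3
      simp only [List.tail_cons] at ih ⊢
      rw [ih, flushA_eq,
        tw_break _ _ (by decide) (by simp [singleDelims, twoCharOps, String.ext_iff]),
        emit2 _ _ _ (by decide) (by decide), loopB_takeWord t]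
      simp [optFlush]
  | case9 c rest inq cur toks h1 h2 h3 h4 h5 h6 h7 h ih =>
      obtain ⟨rfl, hh⟩ := h
      obtain ⟨t, rfl⟩ : ∃ t, rest = '>' :: t := by
        cases rest <;> simp_all
      obtain rfl : inq = none := not_not.mp h3
      simp only [List.tail_cons] at ih ⊢
      rw [ih, flushA_eq,
        tw_break _ _ (by decide) (by simp [singleDelims, twoCharOps, String.ext_iff]),
        emit2 _ _ _ (by decide) (by decide), loopB_takeWord t]
      simp [optFlush]
  | case10 c rest inq cur toks h1 h2 h3 h4 h5 h6 h7 h8 h ih =>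
      obtain ⟨rfl, hh⟩ := h
      obtain ⟨t, rfl⟩ : ∃ t, rest = '>' :: t := by
        cases rest <;> simp_all
      obtain rfl : inq = none := not_not.mp h3
      simp only [List.tail_cons] at ih ⊢
      rw [ih, flushA_eq,
        tw_break _ _ (by decide) (by simp [singleDelims, twoCharOps, String.ext_iff]),
        emit2 _ _ _ (by decide) (by decide), loopB_takeWord t]
      simp [optFlush]
  | case11 c rest inq cur toks h1 h2 h3 h4 h5 h6 h7 h8 h9 h ih =>
      obtain ⟨rfl, hh⟩ := h
      obtain ⟨t, rfl⟩ : ∃ t, rest = '>' :: t := by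
        cases rest <;> simp_all
      obtain rfl : inq = none := not_not.mp h3
      simp only [List.tail_cons] at ih ⊢
      rw [ih, flushA_eq,
        tw_break _ _ (by decide) (by simp [singleDelims, twoCharOps, String.ext_iff]),
        emit2 _ _ _ (by decide) (by decide), loopB_takeWord t]
      simp [optFlush]
  | case12 c rest inq cur toks h1 h2 h3 h4 h5 h6 h7 h8 h9 h10 h ih =>
      obtain ⟨rfl, hh⟩ := h
      obtain ⟨t, rfl⟩ : ∃ t, rest = '<' :: t := by
        cases rest <;> simp_all
      obtain rfl : inq = none := not_not.mp h3
      simp only [List.tail_cons] at ih ⊢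
      rw [ih, flushA_eq,
        tw_break _ _ (by decide) (by simp [singleDelims, twoCharOps, String.ext_iff]),
        emit2 _ _ _ (by decide) (by decide), loopB_takeWord t]
      simp [optFlush]
  | case13 c rest inq cur toks h1 h2 h3 h4 h5 h6 h7 h8 h9 h10 h11 h ih =>
      obtain ⟨rfl, hh⟩ := h
      obtain ⟨t, rfl⟩ : ∃ t, rest = '(' :: t := by
        cases rest <;> simp_all
      obtain rfl : inq = none := not_not.mp h3
      simp only [List.tail_cons] at ih ⊢
      rw [ih, flushA_eq,
        tw_break _ _ (by decide) (by simp [singleDelims, twoCharOps, String.ext_iff]),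
        emit2 _ _ _ (by decide) (by decide), loopB_takeWord t]
      simp [optFlush]
  | case14 c rest inq cur toks h1 h2 h3 h4 h5 h6 h7 h8 h9 h10 h11 h12 h ih =>
      obtain ⟨rfl, hh⟩ := h
      obtain ⟨t, rfl⟩ : ∃ t, rest = '(' :: t := by
        cases rest <;> simp_all
      obtain rfl : inq = none := not_not.mp h3
      simp only [List.tail_cons] at ih ⊢
      rw [ih, flushA_eq,
        tw_break _ _ (by decide) (by simp [singleDelims, twoCharOps, String.ext_iff]),
        emit2 _ _ _ (by decide) (by decide), loopB_takeWord t]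
      simp [optFlush]
  | case15 c rest inq cur toks h1 h2 h3 h4 h5 h6 h7 h8 h9 h10 h11 h12 h13 h ih =>
      obtain ⟨rfl, hh⟩ := h
      obtain ⟨t, rfl⟩ : ∃ t, rest = '(' :: t := by
        cases rest <;> simp_all
      obtain rfl : inq = none := not_not.mp h3
      simp only [List.tail_cons] at ih ⊢
      rw [ih, flushA_eq,
        tw_break _ _ (by decide) (by simp [singleDelims, twoCharOps, String.ext_iff]),
        emit2 _ _ _ (by decide) (by decide), loopB_takeWord t]
      simp [optFlush]
  | case16 c rest inq cur toks h1 h2 h3 h4 h5 h6 h7 h8 h9 h10 h11 h12 h13 h14 h ih =>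
      obtain rfl : inq = none := not_not.mp h3
      have hop : String.ofList (c :: rest.take 1) ∉ twoCharOps := by
        cases rest with
        | nil => rcases h with rfl | rfl | rfl | rfl | rfl <;> decide
        | cons d t =>
          rcases h with rfl | rfl | rfl | rfl | rfl <;>
            simp_all [twoCharOps, String.ext_iff]
      rw [ih, flushA_eq,
        tw_break _ _ (by rcases h with rfl | rfl | rfl | rfl | rfl <;> decide)
          (by rcases h with rfl | rfl | rfl | rfl | rfl <;> simp [singleDelims]),
        emit1 _ _ h4 hop (by rcases h with rfl | rfl | rfl | rfl | rfl <;> decide),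
        loopB_takeWord rest]
      simp [optFlush]
  | case17 c rest inq cur toks h1 h2 h3 h4 h5 h6 h7 h8 h9 h10 h11 h12 h13 h14 h15 ih =>
      obtain rfl : inq = none := not_not.mp h3
      have hq : ¬(c = '"' ∨ c = '\'') := fun hc => h1 ⟨hc, rfl⟩
      have hd : c ∉ singleDelims := by
        simp only [singleDelims, List.mem_cons, List.not_mem_nil, or_false]
        rintro (rfl | rfl | rfl | rfl | rfl | rfl) <;> simp_all
      have hop : String.ofList (c :: rest.take 1) ∉ twoCharOps := by
        cases rest with
        | nil => intro hx; simp [twoCharOps, String.ext_iff] at hx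
        | cons d t =>
          intro hx
          simp [twoCharOps, String.ext_iff] at hx
          rcases hx with ⟨rfl, rfl⟩ | ⟨rfl, rfl⟩ | ⟨rfl, rfl⟩ | ⟨rfl, rfl⟩ | ⟨rfl, rfl⟩ |
            ⟨rfl, rfl⟩ | ⟨rfl, rfl⟩ | ⟨rfl, rfl⟩ | ⟨rfl, rfl⟩ <;> simp_all
      have hw : takeWord (c :: rest) none =
          (c :: (takeWord rest none).1, (takeWord rest none).2) := by
        rw [takeWord]
        simp [hq, h4, hd, hop]
      rw [hw, ih]
      simp

-- ===== VERDICT (by name: the statement is the Claim_ definition above) =====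
theorem tokenize_bash_py_spec : Claim_equal_tokenize_bash_py := by
  intro command _
  unfold Spec_tokenize_bash_py tokenize_bash_py tokenize_bash_py_alt
  rw [main_invariant]
  simp only [List.nil_append]
  exact (loopB_takeWord _).symm
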